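-- pv_equiv track=rewrite | github.com/s9213712/minicnn | src/minicnn/unified/_cuda_native_training_plan.py | _is_generic_mlp_ops
-- ===== SOURCE A (Python) =====
-- _SINGLE_STAGE_ACTIVATIONS = {'GELU', 'LeakyReLU', 'ReLU', 'SiLU', 'Sigmoid', 'Tanh'}
--
-- def _is_generic_mlp_ops(ops: list[str]) -> bool:
--     remaining = ops[1:] if ops and ops[0] == 'Flatten' else list(ops)
--     if len(remaining) < 5 or remaining[0] != 'Linear' or remaining[-1] != 'Linear':
--         return False
--     expect_activation = True
--     for op in remaining[1:-1]:
--         if expect_activation: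
--             if op not in _SINGLE_STAGE_ACTIVATIONS:
--                 return False
--         elif op != 'Linear':
--             return False
--         expect_activation = not expect_activation
--     return not expect_activation
-- ===== SOURCE B (Python) =====
-- _SINGLE_STAGE_ACTIVATIONS = {'GELU', 'LeakyReLU', 'ReLU', 'SiLU', 'Sigmoid', 'Tanh'}
--
-- def _is_generic_mlp_ops(ops: list[str]) -> bool:
--     remaining = ops[1:] if ops and ops[0] == 'Flatten' else list(ops)
--     if len(remaining) < 5 or len(remaining) % 2 == 0:
--         return False
--     return (all(op == 'Linear' for op in remaining[::2])
--             and all(op in _SINGLE_STAGE_ACTIVATIONS for op in remaining[1::2]))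
-- ===== Notes on version B (the rewrite author's own statement) =====
-- stated objective: simpler
-- what changed: Replaces A's stateful alternating-flag loop plus separate first/last checks with a parity guard and two declarative strided passes (even positions all 'Linear', odd positions all activations).
import Mathlib
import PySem

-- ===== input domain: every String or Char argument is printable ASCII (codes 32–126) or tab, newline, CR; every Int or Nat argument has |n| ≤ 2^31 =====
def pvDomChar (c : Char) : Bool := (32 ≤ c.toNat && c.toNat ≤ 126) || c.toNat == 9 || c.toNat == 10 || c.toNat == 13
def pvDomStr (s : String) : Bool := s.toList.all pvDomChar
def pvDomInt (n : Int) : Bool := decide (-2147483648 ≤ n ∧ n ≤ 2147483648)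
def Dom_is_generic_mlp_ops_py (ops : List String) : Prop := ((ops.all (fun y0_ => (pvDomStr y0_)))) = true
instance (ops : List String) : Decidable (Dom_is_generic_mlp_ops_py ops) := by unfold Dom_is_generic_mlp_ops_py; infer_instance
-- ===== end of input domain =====

-- B replaces A's stateful alternating-flag loop (plus separate first/last checks) by a
-- parity guard and two strided all-passes; same O(n) cost, simpler control flow.

-- ===== PORT A =====
-- the module constant _SINGLE_STAGE_ACTIVATIONS (membership test on a small set)
def pvActs : List String := ["GELU", "LeakyReLU", "ReLU", "SiLU", "Sigmoid", "Tanh"]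

def is_generic_mlp_ops_py (ops : List String) : Bool :=
  let remaining :=
    if !ops.isEmpty && (PySem.List.pyGet? ops 0 == some "Flatten")
    then PySem.List.slice ops (some 1) none else ops
  if remaining.length < 5 ∨ PySem.List.pyGet? remaining 0 ≠ some "Linear"
      ∨ PySem.List.pyGet? remaining (-1) ≠ some "Linear" then false
  else
    -- the for-loop over remaining[1:-1] with the expect_activation flag; an early
    -- 'return False' is carried as the first component of the fold state
    let st := (PySem.List.slice remaining (some 1) (some (-1))).foldl
      (fun (st : Bool × Bool) op =>
        (st.1 && (if st.2 then pvActs.contains op else op == "Linear"), !st.2))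
      (true, true)
    st.1 && !st.2

-- ===== PORT B =====
-- hand port of the step-2 slice xs[::2] (exact: elements 0, 2, 4, …); xs[1::2] is pvStride2 (xs.drop 1)
def pvStride2 : List String → List String
  | [] => []
  | [x] => [x]
  | x :: _ :: xs => x :: pvStride2 xs

def is_generic_mlp_ops_py_alt (ops : List String) : Bool :=
  let remaining :=
    if !ops.isEmpty && (PySem.List.pyGet? ops 0 == some "Flatten")
    then PySem.List.slice ops (some 1) none else ops
  if remaining.length < 5 ∨ remaining.length % 2 = 0 then false
  else
    (pvStride2 remaining).all (· == "Linear")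
      && (pvStride2 (remaining.drop 1)).all (pvActs.contains ·)

-- ===== PRECONDITION & SPEC =====
def Spec_is_generic_mlp_ops_py (ops : List String) (out : Bool) : Prop := out = is_generic_mlp_ops_py_alt ops
instance (ops : List String) (out : Bool) : Decidable (Spec_is_generic_mlp_ops_py ops out) := by unfold Spec_is_generic_mlp_ops_py; infer_instance

-- ===== CLAIM (what is proved, stated in full; the proofs are below) =====
def Claim_equal_is_generic_mlp_ops_py : Prop := ∀ (ops : List String), Dom_is_generic_mlp_ops_py ops → Spec_is_generic_mlp_ops_py ops (is_generic_mlp_ops_py ops)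

-- ===== LEMMAS AND PROOFS =====

-- the alternating check performed by A's loop, as a recursion
def pvChain : Bool → List String → Bool
  | _, [] => true
  | exp, x :: xs =>
      (if exp then pvActs.contains x else x == "Linear") && pvChain (!exp) xs

theorem pvStride2_cons (x : String) (xs : List String) :
    pvStride2 (x :: xs) = x :: pvStride2 xs.tail := by
  cases xs <;> simp [pvStride2]

theorem pv_fold_char (m : List String) : ∀ ok exp,
    m.foldl (fun (st : Bool × Bool) op =>
        (st.1 && (if st.2 then pvActs.contains op else op == "Linear"), !st.2))
      (ok, exp)
    = (ok && pvChain exp m, if m.length % 2 = 0 then exp else !exp) := by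
  induction m with
  | nil => intro ok exp; simp [pvChain]
  | cons x xs ih =>
      intro ok exp
      simp only [List.foldl_cons, ih, pvChain, List.length_cons, Prod.mk.injEq]
      refine ⟨by rw [Bool.and_assoc], ?_⟩
      by_cases hp : xs.length % 2 = 0
      · rw [if_pos hp, if_neg (by omega)]
      · rw [if_neg hp, if_pos (by omega), Bool.not_not]

theorem pv_chain_char (m : List String) :
    (pvChain true m
      = ((pvStride2 (m.drop 1)).all (· == "Linear") && (pvStride2 m).all (pvActs.contains ·)))
    ∧ (pvChain false m
      = ((pvStride2 m).all (· == "Linear") && (pvStride2 (m.drop 1)).all (pvActs.contains ·))) := by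
  induction m with
  | nil => constructor <;> simp [pvChain, pvStride2]
  | cons x xs ih =>
      constructor
      · have e : pvChain true (x :: xs) = (pvActs.contains x && pvChain false xs) := by
          simp [pvChain]
        rw [e, ih.2]
        simp only [pvStride2_cons, List.drop_one, List.tail_cons, List.all_cons]
        ac_rfl
      · have e : pvChain false (x :: xs) = ((x == "Linear") && pvChain true xs) := by
          simp [pvChain]
        rw [e, ih.1]
        simp only [pvStride2_cons, List.drop_one, List.tail_cons, List.all_cons]
        ac_rfl

theorem pv_stride_append (m : List String) : ∀ z,
    (pvStride2 (m ++ [z]) = if m.length % 2 = 0 then pvStride2 m ++ [z] else pvStride2 m)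
    ∧ (pvStride2 ((m ++ [z]).drop 1)
        = if m.length % 2 = 0 then pvStride2 (m.drop 1) else pvStride2 (m.drop 1) ++ [z]) := by
  induction m with
  | nil => intro z; refine ⟨?_, ?_⟩ <;> simp [pvStride2]
  | cons x xs ih =>
      intro z
      have i1 := (ih z).1
      have i2 := (ih z).2
      simp only [List.drop_one] at i1 i2 ⊢
      constructor
      · rw [List.cons_append, pvStride2_cons, i2, pvStride2_cons x xs, List.length_cons]
        by_cases hp : xs.length % 2 = 0
        · rw [if_pos hp, if_neg (by omega)]
        · rw [if_neg hp, if_pos (by omega)]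
          simp
      · rw [List.cons_append, List.tail_cons, i1, List.length_cons]
        simp only [List.tail_cons]
        by_cases hp : xs.length % 2 = 0
        · rw [if_pos hp, if_neg (by omega)]
        · rw [if_neg hp, if_pos (by omega)]

theorem pv_slice_mid (h z : String) (m : List String) :
    PySem.List.slice (h :: (m ++ [z])) (some 1) (some (-1)) = m := by
  simp [PySem.List.slice, PySem.List.clampIdx]
  rw [if_neg (by omega)]
  simp

theorem pv_core (r : List String) :
    (if r.length < 5 ∨ PySem.List.pyGet? r 0 ≠ some "Linear"
        ∨ PySem.List.pyGet? r (-1) ≠ some "Linear" then false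
     else
       let st := (PySem.List.slice r (some 1) (some (-1))).foldl
         (fun (st : Bool × Bool) op =>
           (st.1 && (if st.2 then pvActs.contains op else op == "Linear"), !st.2))
         (true, true)
       st.1 && !st.2)
    = (if r.length < 5 ∨ r.length % 2 = 0 then false
       else (pvStride2 r).all (· == "Linear")
          && (pvStride2 (r.drop 1)).all (pvActs.contains ·)) := by
  by_cases h5 : r.length < 5
  · rw [if_pos (Or.inl h5), if_pos (Or.inl h5)]
  · -- r has at least 5 elements: write it as h :: (m ++ [z])
    match r, h5 with
    | h :: t, h5 =>
      rcases List.eq_nil_or_concat t with rfl | ⟨m, z, rfl⟩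
      · simp at h5
      · simp only [List.concat_eq_append] at h5 ⊢
        have hlast : PySem.List.pyGet? (h :: (m ++ [z])) (-1) = some z := by
          rw [PySem.List.pyGet?_neg_one, show h :: (m ++ [z]) = (h :: m) ++ [z] by simp,
            List.getLast?_concat]
        have hlen : (h :: (m ++ [z])).length = m.length + 2 := by simp
        rw [pv_slice_mid, pv_fold_char, PySem.List.pyGet?_zero_cons, hlast, hlen]
        rw [hlen] at h5
        by_cases hp : m.length % 2 = 0
        · -- even middle: both sides are false
          have hB2 : (m.length + 2) % 2 = 0 := by omega
          rw [if_pos hp, if_pos (Or.inr hB2)]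
          simp
        · -- odd middle length
          have hB : ¬(m.length + 2 < 5 ∨ (m.length + 2) % 2 = 0) := by omega
          rw [if_neg hB]
          have hs := pv_stride_append m z
          rw [if_neg hp, if_neg hp] at hs
          simp only [List.drop_one] at hs
          rw [pvStride2_cons]
          simp only [List.drop_one, List.tail_cons, hs.1, hs.2, List.all_cons, List.all_append]
          by_cases hh : h = "Linear"
          · by_cases hz : z = "Linear"
            · rw [if_neg (show ¬((m.length + 2 < 5) ∨ some h ≠ some "Linear" ∨ some z ≠ some "Linear") by
                simp [hh, hz]; omega)]
              have hI : (if m.length % 2 = 0 then true else !true) = false := by rw [if_neg hp]; decide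
              rw [hI]
              simp [(pv_chain_char m).1, hh, hz, List.drop_one]
            · rw [if_pos (Or.inr (Or.inr (by simp [hz])))]
              simp [hz]
          · rw [if_pos (Or.inr (Or.inl (by simp [hh])))]
            simp [hh]

-- ===== VERDICT (by name: the statement is the Claim_ definition above) =====
theorem is_generic_mlp_ops_py_spec : Claim_equal_is_generic_mlp_ops_py := by
  intro ops _
  unfold Spec_is_generic_mlp_ops_py is_generic_mlp_ops_py is_generic_mlp_ops_py_alt
  exact pv_core _
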